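-- pv_equiv track=rewrite | github.com/zhangsan-tea/video-subtitle-extractor | videoEnv/lib/python3.12/site-packages/paddle/distributed/flex_checkpoint/dcp/load_state_dict.py | divide_positions
-- ===== SOURCE A (Python) =====
-- def divide_positions(m, n):
--     '''
--     Divide positions evenly among n processors with a base value and remainder handling.
--
--     Parameters:
--     m (int): Total number of tensor positions.
--     n (int): Number of processors.
--
--     Returns:
--     list: A list of positions indicating where to split the tensors among processors.
--
--     Raises:
--     ValueError: If n is zero or if m is less than n.
--     '''
--     if n == 0:
--         raise ValueError("n should be greater than zero")
--     if m < n: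
--         raise ValueError(
--             f"tensor number {m} should be greater than or equal to processor number {n}"
--         )
--     base_value = m // n
--     remainder = m % n
--     positions = [0]
--     for i in range(1, n):
--         if remainder > 0:
--             positions.append(positions[-1] + base_value + 1)
--             remainder -= 1
--         else:
--             positions.append(positions[-1] + base_value)
--     positions.append(m)
--     return positions
-- ===== SOURCE B (Python) =====
-- def divide_positions(m, n):
--     if n == 0:
--         raise ValueError("n should be greater than zero")
--     if m < n:
--         raise ValueError(
--             f"tensor number {m} should be greater than or equal to processor number {n}"
--         )
--     base_value, remainder = divmod(m, n)
--     return [0] + [i * base_value + min(i, remainder) for i in range(1, n)] + [m]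
-- ===== Notes on version B (the rewrite author's own statement) =====
-- stated objective: simpler
-- what changed: Replaces A's accumulating loop over (positions[-1], decremented remainder) with a direct closed form per index, i*base_value + min(i, remainder), built as one list expression.
import Mathlib
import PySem

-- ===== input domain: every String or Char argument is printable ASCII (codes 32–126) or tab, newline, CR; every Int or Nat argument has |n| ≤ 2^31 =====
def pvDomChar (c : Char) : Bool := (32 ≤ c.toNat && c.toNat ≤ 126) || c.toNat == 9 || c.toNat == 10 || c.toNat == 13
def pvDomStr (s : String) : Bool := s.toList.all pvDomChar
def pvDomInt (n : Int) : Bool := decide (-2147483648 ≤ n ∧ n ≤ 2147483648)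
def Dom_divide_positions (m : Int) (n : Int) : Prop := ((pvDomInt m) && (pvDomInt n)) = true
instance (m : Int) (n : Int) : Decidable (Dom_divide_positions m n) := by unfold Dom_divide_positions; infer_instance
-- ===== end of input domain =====

-- B replaces A's accumulating loop (positions[-1] plus a decremented remainder) by a
-- direct closed form per index, i*base + min(i, remainder); objective: simpler.

-- ===== PORT A =====
-- A's loop: state is (positions, remainder); positions[-1] is getLast! (positions starts
-- as [0] and only grows, so it is never empty and the panic default is never reached).
def divide_positions (m : Int) (n : Int) : List Int :=
  let base_value := PySem.Int.floordiv m n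
  let st := (PySem.List.pyRange 1 n 1).foldl
    (fun (st : List Int × Int) _i =>
      if st.2 > 0 then
        (st.1 ++ [st.1.getLast! + base_value + 1], st.2 - 1)
      else
        (st.1 ++ [st.1.getLast! + base_value], st.2))
    ([0], PySem.Int.mod m n)
  st.1 ++ [m]

-- ===== PORT B =====
def divide_positions_alt (m : Int) (n : Int) : List Int :=
  let base_value := PySem.Int.floordiv m n
  let remainder := PySem.Int.mod m n
  [0] ++ (PySem.List.pyRange 1 n 1).map (fun i => i * base_value + min i remainder) ++ [m]

-- ===== PRECONDITION & SPEC =====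
-- Pre_ excludes exactly the inputs where Python A raises ValueError: n == 0 or m < n.
def Pre_divide_positions (m : Int) (n : Int) : Prop := n ≠ 0 ∧ n ≤ m
instance (m : Int) (n : Int) : Decidable (Pre_divide_positions m n) := by unfold Pre_divide_positions; infer_instance
def pvWitness_divide_positions : Int × Int := (7, 3)
def Spec_divide_positions (m : Int) (n : Int) (out : List Int) : Prop := out = divide_positions_alt m n
instance (m : Int) (n : Int) (out : List Int) : Decidable (Spec_divide_positions m n out) := by unfold Spec_divide_positions; infer_instance

-- ===== CLAIM (what is proved, stated in full; the proofs are below) =====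
def Claim_equal_divide_positions : Prop := ∀ (m : Int) (n : Int), Dom_divide_positions m n → Pre_divide_positions m n → Spec_divide_positions m n (divide_positions m n)

-- ===== LEMMAS AND PROOFS =====

-- the last element of l ++ [x] is x (getLast! form, as left by A's positions[-1])
lemma concat_getLast_bang (l : List Int) (x : Int) : (l ++ [x]).getLast! = x := by
  cases h : l ++ [x] with
  | nil => simp at h
  | cons a t => simp [List.getLast!, ← h]

-- Loop invariant for A: after the iterations 1..j, positions is exactly B's closed form
-- on range(1, 1+j) and the remaining remainder is r - min j r.
lemma divide_positions_loop_inv (b r : Int) (hr : 0 ≤ r) (j : Nat) :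
    (PySem.List.pyRange 1 (1 + (j : Int)) 1).foldl
      (fun (st : List Int × Int) _i =>
        if st.2 > 0 then
          (st.1 ++ [st.1.getLast! + b + 1], st.2 - 1)
        else
          (st.1 ++ [st.1.getLast! + b], st.2))
      ([0], r)
    = ([0] ++ (PySem.List.pyRange 1 (1 + (j : Int)) 1).map (fun i => i * b + min i r),
       r - min (j : Int) r) := by
  induction j with
  | zero => simp [PySem.List.pyRange_one_eq_nil, hr]
  | succ k ih =>
    have h1 : (1 : Int) ≤ 1 + (k : Int) := by omega
    have hsplit : PySem.List.pyRange 1 (1 + ((k + 1 : Nat) : Int)) 1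
        = PySem.List.pyRange 1 (1 + (k : Int)) 1 ++ [1 + (k : Int)] := by
      have : (1 + ((k + 1 : Nat) : Int)) = (1 + (k : Int)) + 1 := by push_cast; ring
      rw [this, PySem.List.pyRange_one_succ_right h1]
    rw [hsplit, List.foldl_append, ih, List.map_append, List.foldl_cons, List.foldl_nil]
    -- the last element of the accumulated list is the closed form at index k
    have hlast : ([0] ++ (PySem.List.pyRange 1 (1 + (k : Int)) 1).map
        (fun i => i * b + min i r)).getLast! = (k : Int) * b + min (k : Int) r := by
      cases k with
      | zero =>
        simp [PySem.List.pyRange_one_eq_nil]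
        omega
      | succ k' =>
        have h1' : (1 : Int) ≤ 1 + (k' : Int) := by omega
        have : (1 + ((k' + 1 : Nat) : Int)) = (1 + (k' : Int)) + 1 := by push_cast; ring
        rw [this, PySem.List.pyRange_one_succ_right h1', List.map_append,
          ← List.append_assoc]
        simp only [List.map_cons, List.map_nil]
        rw [concat_getLast_bang]
        have hc : ((k' + 1 : Nat) : Int) = 1 + (k' : Int) := by push_cast; ring
        rw [hc]
    by_cases hrem : r - min (k : Int) r > 0
    · have hmin : min (k : Int) r = (k : Int) := by omega
      have hmin' : min (1 + (k : Int)) r = (k : Int) + 1 := by omega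
      have hval : (1 + (k : Int)) * b + min (1 + (k : Int)) r
          = ((k : Int) * b + min (k : Int) r) + b + 1 := by rw [hmin, hmin']; ring
      simp only [if_pos hrem, hlast]
      refine Prod.ext ?_ ?_
      · simp only [List.map_cons, List.map_nil, List.append_assoc, hval]
      · simp only []
        push_cast
        omega
    · have hmin : min (k : Int) r = r := by omega
      have hmin' : min (1 + (k : Int)) r = r := by omega
      have hval : (1 + (k : Int)) * b + min (1 + (k : Int)) r
          = ((k : Int) * b + min (k : Int) r) + b := by rw [hmin, hmin']; ring
      simp only [if_neg hrem, hlast]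
      refine Prod.ext ?_ ?_
      · simp only [List.map_cons, List.map_nil, List.append_assoc, hval]
      · simp only []
        push_cast
        omega

-- ===== VERDICT (by name: the statement is the Claim_ definition above) =====
theorem divide_positions_spec : Claim_equal_divide_positions := by
  intro m n _ hpre
  obtain ⟨hn0, hnm⟩ := hpre
  unfold Spec_divide_positions divide_positions divide_positions_alt
  by_cases hn : n ≤ 0
  · -- n < 0: the range is empty, both sides are [0, m]
    rw [PySem.List.pyRange_one_eq_nil (by omega)]
    simp
  · -- n ≥ 1: apply the loop invariant with j = (n-1).toNat
    have hpos : 0 < n := by omega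
    have hr : 0 ≤ PySem.Int.mod m n := PySem.Int.mod_nonneg m hpos
    have hj : (1 : Int) + (((n - 1).toNat : Nat) : Int) = n := by omega
    have := divide_positions_loop_inv (PySem.Int.floordiv m n) (PySem.Int.mod m n) hr (n - 1).toNat
    rw [hj] at this
    simp only [this]
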